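-- pv_equiv track=rewrite | github.com/Orochimarufan/cdev | cdev/struct.py | calccount
-- ===== SOURCE A (Python) =====
-- def calccount(fmt):
--     """
--     Calculate the number of items in a format string
--     """
--     cnt = 0
--     numbuf = []
--
--     for c in fmt:
--         if c.isdigit():
--             numbuf.append(c)
--             continue
--         elif numbuf:
--             times = int("".join(numbuf))
--             numbuf.clear()
--         else:
--             times = 1
--
--         if c in "@=<>!":
--             pass # doesn't impact item count
--         elif c in "sp":
--             # Strings are prepended with the length, not a multiplier.
--             cnt += 1
--         else:
--             cnt += times
--     return cnt
-- ===== SOURCE B (Python) =====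
-- def calccount(fmt):
--     """
--     Calculate the number of items in a format string
--     """
--     # Pass 1: tokenize into (multiplier, specifier) pairs; a trailing digit
--     # run with no following specifier is dropped.
--     tokens = []
--     i, n = 0, len(fmt)
--     while i < n:
--         j = i
--         while j < n and fmt[j].isdigit():
--             j += 1
--         if j == n:
--             break
--         tokens.append((int(fmt[i:j]) if j > i else 1, fmt[j]))
--         i = j + 1
--     # Pass 2: reduce the token list.
--     return sum(0 if c in "@=<>!" else 1 if c in "sp" else t for t, c in tokens)
-- ===== Notes on version B (the rewrite author's own statement) =====
-- stated objective: idiomatic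
-- what changed: B replaces A's incremental digit-buffer state machine with a two-pass structure: first tokenize the whole string into (multiplier, specifier) pairs, then sum the weights of the tokens in a separate reducing pass.
import Mathlib
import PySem

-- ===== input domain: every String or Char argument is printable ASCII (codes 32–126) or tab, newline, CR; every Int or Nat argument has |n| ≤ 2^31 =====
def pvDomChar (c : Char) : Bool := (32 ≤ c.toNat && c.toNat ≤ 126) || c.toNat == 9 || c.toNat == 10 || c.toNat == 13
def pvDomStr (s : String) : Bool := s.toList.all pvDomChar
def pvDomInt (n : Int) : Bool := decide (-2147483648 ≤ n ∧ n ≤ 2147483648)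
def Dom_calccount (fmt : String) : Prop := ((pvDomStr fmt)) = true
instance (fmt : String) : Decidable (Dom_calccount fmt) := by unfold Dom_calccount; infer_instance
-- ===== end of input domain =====

-- B replaces A's incremental digit-buffer state machine with a two-pass
-- tokenize-then-reduce decomposition (idiomatic; same behaviour, same cost).

-- ===== PORT A =====
-- A's loop: state (cnt, numbuf); digits accumulate, a specifier flushes the buffer.
-- int("".join(numbuf)): numbuf is a nonempty run of ASCII digits here, so
-- PySem.Int.ofChars? never returns none and .getD 0 is exact.
def calccount (fmt : String) : Int :=
  (fmt.toList.foldl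
    (fun (st : Int × List Char) (c : Char) =>
      if PySem.Chars.isdigit c then (st.1, st.2 ++ [c])
      else
        let times : Int := if st.2 ≠ [] then (PySem.Int.ofChars? st.2).getD 0 else 1
        if ("@=<>!".toList.contains c) then (st.1, [])
        else if ("sp".toList.contains c) then (st.1 + 1, [])
        else (st.1 + times, []))
    (0, [])).1

-- ===== PORT B =====
-- B pass 1: split the character list into (multiplier, specifier) tokens;
-- a trailing digit run with no following specifier is dropped.
def pvTokenize (cs : List Char) : List (Int × Char) :=
  let digs := cs.takeWhile PySem.Chars.isdigit
  match h : cs.drop digs.length with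
  | [] => []
  | c :: rest =>
      ((if digs ≠ [] then (PySem.Int.ofChars? digs).getD 0 else 1), c) :: pvTokenize rest
termination_by cs.length
decreasing_by
  have hlen := congrArg List.length h
  simp [List.length_drop] at hlen
  omega

-- B pass 2: sum the weight of each token.
def calccount_alt (fmt : String) : Int :=
  (pvTokenize fmt.toList).foldl
    (fun (acc : Int) (tc : Int × Char) =>
      acc + (if ("@=<>!".toList.contains tc.2) then 0
             else if ("sp".toList.contains tc.2) then 1 else tc.1)) 0

-- ===== PRECONDITION & SPEC =====
def Spec_calccount (fmt : String) (out : Int) : Prop := out = calccount_alt fmt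
instance (fmt : String) (out : Int) : Decidable (Spec_calccount fmt out) := by unfold Spec_calccount; infer_instance

-- ===== CLAIM (what is proved, stated in full; the proofs are below) =====
def Claim_equal_calccount : Prop := ∀ (fmt : String), Dom_calccount fmt → Spec_calccount fmt (calccount fmt)

-- ===== LEMMAS AND PROOFS =====

-- the token weight B sums
def pvWeight (tc : Int × Char) : Int :=
  if ("@=<>!".toList.contains tc.2) then 0
  else if ("sp".toList.contains tc.2) then 1 else tc.1

lemma pv_foldl_weight_shift (l : List (Int × Char)) :
    ∀ acc : Int,
      l.foldl (fun (a : Int) (tc : Int × Char) => a + pvWeight tc) acc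
        = acc + l.foldl (fun (a : Int) (tc : Int × Char) => a + pvWeight tc) 0 := by
  induction l with
  | nil => intro acc; simp
  | cons hd tl ih =>
    intro acc
    simp only [List.foldl_cons]
    rw [ih (acc + pvWeight hd), ih (0 + pvWeight hd)]
    ring

def pvS (cs : List Char) : Int :=
  (pvTokenize cs).foldl (fun (a : Int) (tc : Int × Char) => a + pvWeight tc) 0

lemma pv_takeWhile_digits_append (buf : List Char) (c : Char) (cs : List Char)
    (hb : buf.all PySem.Chars.isdigit) (hc : PySem.Chars.isdigit c = false) :
    (buf ++ c :: cs).takeWhile PySem.Chars.isdigit = buf := by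
  induction buf with
  | nil => simp [List.takeWhile, hc]
  | cons b bs ih =>
    simp only [List.all_cons, Bool.and_eq_true] at hb
    simp [List.takeWhile, hb.1, ih hb.2]

lemma pv_tokenize_digits (buf : List Char) (hb : buf.all PySem.Chars.isdigit) :
    pvTokenize buf = [] := by
  have h1 : buf.takeWhile PySem.Chars.isdigit = buf :=
    List.takeWhile_eq_self_iff.mpr (by intro x hx; exact List.all_eq_true.mp hb x hx)
  rw [pvTokenize]
  split
  next => rfl
  next c rest h =>
    rw [h1, List.drop_length] at h
    cases h

lemma pv_tokenize_step (buf : List Char) (c : Char) (cs : List Char)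
    (hb : buf.all PySem.Chars.isdigit) (hc : PySem.Chars.isdigit c = false) :
    pvTokenize (buf ++ c :: cs)
      = ((if buf ≠ [] then (PySem.Int.ofChars? buf).getD 0 else 1), c) :: pvTokenize cs := by
  have h1 : (buf ++ c :: cs).takeWhile PySem.Chars.isdigit = buf :=
    pv_takeWhile_digits_append buf c cs hb hc
  have h2 : (buf ++ c :: cs).drop buf.length = c :: cs := by
    simpa using List.drop_left buf (c :: cs)
  rw [pvTokenize]
  split
  next h =>
    rw [h1, h2] at h
    cases h
  next c' rest h =>
    rw [h1] at h ⊢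
    rw [h2] at h
    injection h with hA hB
    subst hA; subst hB
    rfl

lemma pvS_digits (buf : List Char) (hb : buf.all PySem.Chars.isdigit) : pvS buf = 0 := by
  simp [pvS, pv_tokenize_digits buf hb]

lemma pvS_step (buf : List Char) (c : Char) (cs : List Char)
    (hb : buf.all PySem.Chars.isdigit) (hc : PySem.Chars.isdigit c = false) :
    pvS (buf ++ c :: cs)
      = pvWeight ((if buf ≠ [] then (PySem.Int.ofChars? buf).getD 0 else 1), c) + pvS cs := by
  simp only [pvS, pv_tokenize_step buf c cs hb hc, List.foldl_cons]
  rw [pv_foldl_weight_shift]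
  ring

-- the loop invariant: A's running fold from state (cnt, buf) ends at cnt + B's sum of (buf ++ rest)
lemma pv_main (cs : List Char) :
    ∀ (cnt : Int) (buf : List Char), buf.all PySem.Chars.isdigit →
      (cs.foldl
        (fun (st : Int × List Char) (c : Char) =>
          if PySem.Chars.isdigit c then (st.1, st.2 ++ [c])
          else
            let times : Int := if st.2 ≠ [] then (PySem.Int.ofChars? st.2).getD 0 else 1
            if ("@=<>!".toList.contains c) then (st.1, [])
            else if ("sp".toList.contains c) then (st.1 + 1, [])
            else (st.1 + times, []))
        (cnt, buf)).1 = cnt + pvS (buf ++ cs) := by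
  induction cs with
  | nil =>
    intro cnt buf hb
    simp [pvS_digits buf hb]
  | cons c cs ih =>
    intro cnt buf hb
    by_cases hd : PySem.Chars.isdigit c = true
    · rw [List.foldl_cons]
      simp only [hd, if_pos rfl]
      have hb' : (buf ++ [c]).all PySem.Chars.isdigit := by
        simp [List.all_append, hb, hd]
      have := ih cnt (buf ++ [c]) hb'
      simpa [List.append_assoc] using this
    · rw [Bool.not_eq_true] at hd
      rw [List.foldl_cons]
      simp only [hd, Bool.false_eq_true, if_false]
      rw [pvS_step buf c cs hb hd]
      set t : Int := if buf ≠ [] then (PySem.Int.ofChars? buf).getD 0 else 1 with ht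
      by_cases h1 : ("@=<>!".toList.contains c) = true
      · simp only [h1, if_true]
        rw [ih cnt [] (by simp)]
        have hw : pvWeight (t, c) = 0 := by unfold pvWeight; simp only [h1, if_true]
        rw [hw]; simp [List.nil_append]; try ring
      · rw [Bool.not_eq_true] at h1
        by_cases h2 : ("sp".toList.contains c) = true
        · simp only [h1, Bool.false_eq_true, if_false, h2, if_true]
          rw [ih (cnt + 1) [] (by simp)]
          have hw : pvWeight (t, c) = 1 := by
            unfold pvWeight; simp only [h1, Bool.false_eq_true, if_false, h2, if_true]
          rw [hw]; simp [List.nil_append]; try ring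
        · rw [Bool.not_eq_true] at h2
          simp only [h1, h2, Bool.false_eq_true, if_false]
          rw [ih (cnt + t) [] (by simp)]
          have hw : pvWeight (t, c) = t := by
            unfold pvWeight; simp only [h1, h2, Bool.false_eq_true, if_false]
          rw [hw]; simp [List.nil_append]; try ring

-- ===== VERDICT (by name: the statement is the Claim_ definition above) =====
theorem calccount_spec : Claim_equal_calccount := by
  intro fmt _
  show calccount fmt = calccount_alt fmt
  have h := pv_main fmt.toList 0 [] (by simp)
  simpa [calccount, calccount_alt, pvS, pvWeight] using h
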